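-- pv_equiv track=rewrite | github.com/joshuabenuck/deltadactyl | deltadactyl.py | parseIdentifier
-- ===== SOURCE A (Python) =====
-- TOKID = 0; TOKNUM = 1; TOKEQ = 2; TOKNONE = 3
--
-- def parseIdentifier(args):
--   token = ""
--   while len(args) > 0:
--     c = args[0]; args = args[1:]
--     if c >= 'a' and c <= 'z':
--       token+=c
--     elif c >= 'A' and c <= 'Z':
--       token+=c
--     else:
--       args=c+args
--       break
--   return (TOKID, token, args)
-- ===== SOURCE B (Python) =====
-- import re
--
-- TOKID = 0; TOKNUM = 1; TOKEQ = 2; TOKNONE = 3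
--
-- def parseIdentifier(args):
--   token = re.match('[a-zA-Z]*', args).group()
--   return (TOKID, token, args[len(token):])
-- ===== Notes on version B (the rewrite author's own statement) =====
-- stated objective: faster
-- what changed: Replaces A's char-by-char consume-and-put-back while loop (which rebuilds the remaining string on every iteration) with a single regex match of the maximal [a-zA-Z]* prefix and one slice of the remainder.
import Mathlib
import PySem

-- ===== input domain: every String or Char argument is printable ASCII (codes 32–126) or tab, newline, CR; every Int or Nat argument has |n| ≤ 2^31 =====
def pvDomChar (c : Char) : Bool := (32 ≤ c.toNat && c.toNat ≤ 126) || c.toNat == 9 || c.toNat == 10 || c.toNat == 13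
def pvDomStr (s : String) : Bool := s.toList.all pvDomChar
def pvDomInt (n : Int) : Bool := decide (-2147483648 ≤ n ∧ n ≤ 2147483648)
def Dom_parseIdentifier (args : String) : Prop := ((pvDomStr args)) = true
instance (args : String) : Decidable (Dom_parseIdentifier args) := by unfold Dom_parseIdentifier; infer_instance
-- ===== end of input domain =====

-- B replaces A's consume-then-put-back while loop by a one-shot maximal [a-zA-Z]* prefix match
-- (regex in Python, takeWhile in the port) plus one slice; objective: idiomatic.

-- ===== PORT A =====
-- the letter test exactly as A writes it: 'a' <= c <= 'z' or 'A' <= c <= 'Z'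
def pvIsLetter (c : Char) : Bool := ('a' ≤ c && c ≤ 'z') || ('A' ≤ c && c ≤ 'Z')

-- A's while loop: state = (remaining args as chars, token so far); on a non-letter,
-- the char is put back in front of the remainder and the loop breaks.
def pvGoA : List Char → List Char → List Char × List Char
  | [], tok => (tok, [])
  | c :: rest, tok =>
    if pvIsLetter c then pvGoA rest (tok ++ [c]) else (tok, c :: rest)

def parseIdentifier (args : String) : Int × String × String :=
  let r := pvGoA args.toList []
  (0, String.mk r.1, String.mk r.2)

-- ===== PORT B =====
-- Source B: token = re.match('[a-zA-Z]*', args).group() — the maximal prefix of chars in the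
-- class [a-zA-Z], i.e. takeWhile on that class — then args[len(token):].
def parseIdentifier_alt (args : String) : Int × String × String :=
  let l := args.toList
  let token := l.takeWhile pvIsLetter
  (0, String.mk token, String.mk (l.drop token.length))

-- ===== PRECONDITION & SPEC =====
def Spec_parseIdentifier (args : String) (out : Int × String × String) : Prop := out = parseIdentifier_alt args
instance (args : String) (out : Int × String × String) : Decidable (Spec_parseIdentifier args out) := by unfold Spec_parseIdentifier; infer_instance

-- ===== CLAIM (what is proved, stated in full; the proofs are below) =====
def Claim_equal_parseIdentifier : Prop := ∀ (args : String), Dom_parseIdentifier args → Spec_parseIdentifier args (parseIdentifier args)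

-- ===== LEMMAS AND PROOFS =====
theorem pvGoA_eq (l tok : List Char) :
    pvGoA l tok = (tok ++ l.takeWhile pvIsLetter, l.dropWhile pvIsLetter) := by
  induction l generalizing tok with
  | nil => simp [pvGoA]
  | cons c rest ih =>
    by_cases h : pvIsLetter c = true
    · simp [pvGoA, h, ih]
    · simp [pvGoA, h]

theorem pvDrop_takeWhile (l : List Char) :
    l.drop (l.takeWhile pvIsLetter).length = l.dropWhile pvIsLetter := by
  induction l with
  | nil => simp
  | cons c rest ih =>
    by_cases h : pvIsLetter c = true
    · simp [List.takeWhile, List.dropWhile, h, ih]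
    · simp [List.takeWhile, List.dropWhile, h]

-- ===== VERDICT (by name: the statement is the Claim_ definition above) =====
theorem parseIdentifier_spec : Claim_equal_parseIdentifier := by
  intro args _
  unfold Spec_parseIdentifier parseIdentifier parseIdentifier_alt
  simp [pvGoA_eq, pvDrop_takeWhile]
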